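-- pv_equiv track=rewrite | github.com/miaroe/lymph-node-classification | src/data/make_new_datastructure.py | get_seq_number
-- ===== SOURCE A (Python) =====
-- def get_seq_number(sequence_label_list):
--     label_count = {}
--     seq_number = []
--     for label in sequence_label_list:
--         if label in label_count: label_count[label] += 1
--         else: label_count[label] = 1
--         seq_number.append(label_count[label])
--     return seq_number
-- ===== SOURCE B (Python) =====
-- def get_seq_number(sequence_label_list):
--     seq = list(sequence_label_list)
--     return [seq[:i + 1].count(label) for i, label in enumerate(seq)]
-- ===== Notes on version B (the rewrite author's own statement) =====
-- stated objective: alternative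
-- what changed: Replaces the maintained per-label dict counter with a comprehension over enumerate that recomputes each running count as a prefix-slice count, trading the O(n) dict bookkeeping for an O(n^2) nested scan with no mutable state.
import Mathlib
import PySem

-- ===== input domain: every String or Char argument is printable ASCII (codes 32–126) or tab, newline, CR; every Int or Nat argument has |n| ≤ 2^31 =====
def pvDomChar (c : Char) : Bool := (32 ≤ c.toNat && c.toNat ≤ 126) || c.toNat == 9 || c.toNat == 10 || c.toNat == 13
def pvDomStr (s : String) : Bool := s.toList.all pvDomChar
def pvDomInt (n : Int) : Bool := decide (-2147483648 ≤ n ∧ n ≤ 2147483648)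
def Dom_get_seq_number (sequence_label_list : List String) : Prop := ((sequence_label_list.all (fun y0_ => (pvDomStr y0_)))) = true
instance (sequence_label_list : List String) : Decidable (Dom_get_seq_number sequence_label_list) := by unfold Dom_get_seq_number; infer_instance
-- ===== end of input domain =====

-- B replaces A's maintained dict of running counts with a prefix-slice count per position (alternative decomposition, not faster).


-- ===== PORT A =====
-- A's loop body: update the dict (increment if present, else set to 1), then append the fresh value.
def gsnStep (st : PySem.Dict String Int × List Int) (label : String) :
    PySem.Dict String Int × List Int :=
  let d := if st.1.contains label then st.1.modify label 0 (· + 1) else st.1.insert label 1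
  (d, st.2 ++ [d.getD label 0])

def get_seq_number (sequence_label_list : List String) : List Int :=
  (sequence_label_list.foldl gsnStep (PySem.Dict.empty, [])).2

-- ===== PORT B =====
def get_seq_number_alt (sequence_label_list : List String) : List Int :=
  let seq := sequence_label_list
  (PySem.List.enumerate seq 0).map
    (fun p => ((PySem.List.count (PySem.List.slice seq none (some (p.1 + 1))) p.2 : Nat) : Int))

-- ===== PRECONDITION & SPEC =====
def Spec_get_seq_number (sequence_label_list : List String) (out : List Int) : Prop := out = get_seq_number_alt sequence_label_list
instance (sequence_label_list : List String) (out : List Int) : Decidable (Spec_get_seq_number sequence_label_list out) := by unfold Spec_get_seq_number; infer_instance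

-- ===== CLAIM (what is proved, stated in full; the proofs are below) =====
def Claim_equal_get_seq_number : Prop := ∀ (sequence_label_list : List String), Dom_get_seq_number sequence_label_list → Spec_get_seq_number sequence_label_list (get_seq_number sequence_label_list)

-- ===== LEMMAS AND PROOFS =====

-- Invariant of A's loop: the dict holds each label's count so far, and the output list is
-- exactly B's prefix-count list.
theorem gsn_loop (xs : List String) :
    (∀ v, (xs.foldl gsnStep (PySem.Dict.empty, ([] : List Int))).1.getD v 0 = (xs.count v : Int)) ∧
    (xs.foldl gsnStep (PySem.Dict.empty, ([] : List Int))).2 =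
      (PySem.List.enumerate xs 0).map
        (fun p => ((PySem.List.count (PySem.List.slice xs none (some (p.1 + 1))) p.2 : Nat) : Int)) := by
  induction xs using List.reverseRecOn with
  | nil => simp [PySem.List.enumerate, PySem.Dict.getD_empty]
  | append_singleton xs x ih =>
    obtain ⟨hd, hout⟩ := ih
    rw [List.foldl_append]
    constructor
    · intro v
      simp only [List.foldl_cons, List.foldl_nil, gsnStep]
      by_cases hc : (xs.foldl gsnStep (PySem.Dict.empty, ([] : List Int))).1.contains x
      · simp only [hc, if_true, PySem.Dict.getD_modify, hd, List.count_append]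
        by_cases hv : v = x <;> simp [hv, List.count_eq_zero]
      · simp only [Bool.not_eq_true] at hc
        simp only [hc, Bool.false_eq_true, if_false, PySem.Dict.getD_insert, List.count_append]
        by_cases hv : v = x
        · subst hv
          have h0 : (xs.count v : Int) = 0 := by
            rw [← hd v, PySem.Dict.getD_of_not_contains _ _ hc]
          simp [h0]
        · have h1 : List.count v [x] = 0 := by simp [List.count_eq_zero, hv]
          simp [hv, h1, hd]
    · simp only [List.foldl_cons, List.foldl_nil, gsnStep]
      rw [PySem.List.enumerate_append, List.map_append, hout]
      congr 1
      · apply List.map_congr_left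
        intro p hp
        rw [PySem.List.mem_enumerate_iff] at hp
        obtain ⟨k, hk, rfl⟩ := hp
        simp only [zero_add]
        have h1 : PySem.List.slice (xs ++ [x]) none (some ((k : Int) + 1)) =
            PySem.List.slice xs none (some ((k : Int) + 1)) := by
          rw [PySem.List.slice_to _ (by omega), PySem.List.slice_to _ (by omega)]
          apply List.take_append_of_le_length
          omega
        simp [PySem.List.count, h1]
      · simp only [PySem.List.enumerate, List.map_cons, List.map_nil]
        have h2 : PySem.List.slice (xs ++ [x]) none (some ((xs.length : Int) + 1)) = xs ++ [x] := by
          rw [PySem.List.slice_to _ (by omega)]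
          apply List.take_of_length_le
          simp
        by_cases hc : (xs.foldl gsnStep (PySem.Dict.empty, ([] : List Int))).1.contains x
        · simp [hc, PySem.Dict.getD_modify_self, hd, h2, PySem.List.count, List.count_append]
        · simp only [Bool.not_eq_true] at hc
          have h0 : (xs.count x : Int) = 0 := by
            rw [← hd x, PySem.Dict.getD_of_not_contains _ _ hc]
          simp [hc, PySem.Dict.getD_insert_self, h2, PySem.List.count, List.count_append, h0]

-- ===== VERDICT (by name: the statement is the Claim_ definition above) =====
theorem get_seq_number_spec : Claim_equal_get_seq_number := by
  intro xs _
  unfold Spec_get_seq_number get_seq_number get_seq_number_alt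
  exact (gsn_loop xs).2
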